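-- pv_equiv track=rewrite | github.com/Hjaf/aoc | 2022/day10.py | render_output
-- ===== SOURCE A (Python) =====
-- def render_output(h=6, w=40, on_pixel='#', off_pixel=' ', image_data=None):
--     """
--     Takes a list of active pixels from left to right, breaks on width (w)
--     """
--     columns = range(0, w)
--     rows = range(0, h)
--     left_pad = int(len(str(h))+1)
--     header = ['']*2
--     for hc in columns:
--         header[0] += str(hc)[0] if (hc > 9) else ' '
--         header[1] += str(hc)[1] if (hc > 9) else str(hc)[0]
--     frame = ''
--     for header_row in header:
--         frame += ''.rjust(left_pad+1) + header_row + '\n'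
--     frame += ''.rjust(left_pad)+'.'+'—'*(w+1)+'.\n'
--     pixel_position = 0
--     for yi in rows:
--         row = ''
--         for xi in columns:
--             row += off_pixel if pixel_position not in image_data else on_pixel
--             pixel_position += 1
--
--         frame += f'{str(yi).ljust(left_pad)}| {row}|\n'
--     frame += "'".rjust(left_pad+1) + ('—'*(w+1))+"'"
--     return frame
-- ===== SOURCE B (Python) =====
-- def render_output(h=6, w=40, on_pixel='#', off_pixel=' ', image_data=None):
--     left_pad = len(str(h)) + 1
--     header0 = ''.join(str(c)[0] if c > 9 else ' ' for c in range(w))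
--     header1 = ''.join(str(c)[1] if c > 9 else str(c)[0] for c in range(w))
--     cells = [off_pixel] * (max(h, 0) * max(w, 0))
--     for p in image_data:
--         if 0 <= p < len(cells):
--             cells[p] = on_pixel
--     pad = ' ' * left_pad
--     dash = '—' * (w + 1)
--     out = pad + ' ' + header0 + '\n' + pad + ' ' + header1 + '\n'
--     out += pad + '.' + dash + '.\n'
--     for yi in range(h):
--         out += str(yi).ljust(left_pad) + '| ' + ''.join(cells[yi * w:(yi + 1) * w]) + '|\n'
--     return out + pad + "'" + dash + "'"
-- ===== Notes on version B (the rewrite author's own statement) =====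
-- stated objective: alternative
-- what changed: Replaces the per-cell membership scan of image_data (and the threaded pixel counter) by a flat cell buffer built once by scattering the active pixels, rows then emitted by slicing; the header row is built by a join over the column range instead of two accumulated strings.
import Mathlib
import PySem

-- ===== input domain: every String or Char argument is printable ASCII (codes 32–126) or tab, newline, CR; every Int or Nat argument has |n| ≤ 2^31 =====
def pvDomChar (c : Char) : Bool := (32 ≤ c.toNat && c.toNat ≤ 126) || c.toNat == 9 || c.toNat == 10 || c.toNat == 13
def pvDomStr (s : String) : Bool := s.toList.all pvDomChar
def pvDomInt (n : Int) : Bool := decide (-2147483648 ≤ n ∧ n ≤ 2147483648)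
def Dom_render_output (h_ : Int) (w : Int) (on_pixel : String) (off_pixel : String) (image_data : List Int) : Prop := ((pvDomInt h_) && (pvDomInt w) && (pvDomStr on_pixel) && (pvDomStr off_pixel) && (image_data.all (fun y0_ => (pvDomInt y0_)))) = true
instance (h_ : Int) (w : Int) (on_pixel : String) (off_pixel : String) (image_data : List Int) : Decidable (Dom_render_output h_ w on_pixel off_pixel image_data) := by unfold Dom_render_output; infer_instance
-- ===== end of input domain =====

-- B replaces A's per-cell membership scan of image_data by a cell buffer filled once by
-- scattering the active pixels, rows emitted by slicing (objective: alternative).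

-- shared helpers: Python's str.ljust / str.rjust on char lists (exact: pad with spaces on the right/left)
def ljustChars (cs : List Char) (n : Nat) : List Char := cs ++ List.replicate (n - cs.length) ' '
def rjustChars (cs : List Char) (n : Nat) : List Char := List.replicate (n - cs.length) ' ' ++ cs

-- ===== PORT A =====
def render_output (h_ : Int) (w : Int) (on_pixel : String) (off_pixel : String) (image_data : List Int) : String :=
  let columns := PySem.List.pyRange 0 w 1
  let rows := PySem.List.pyRange 0 h_ 1
  let left_pad : Nat := (PySem.Int.toChars h_).length + 1
  let header : List Char × List Char :=
    columns.foldl (fun hd hc =>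
      (hd.1 ++ [if hc > 9 then (PySem.Int.toChars hc).getD 0 ' ' else ' '],
       hd.2 ++ [if hc > 9 then (PySem.Int.toChars hc).getD 1 ' ' else (PySem.Int.toChars hc).getD 0 ' ']))
      ([], [])
  let frame : List Char :=
    [header.1, header.2].foldl (fun frame header_row =>
      frame ++ rjustChars [] (left_pad + 1) ++ header_row ++ ['\n']) []
  let frame := frame ++ rjustChars [] left_pad ++ ['.'] ++ List.replicate (w + 1).toNat '—' ++ ['.', '\n']
  let st : List Char × Int :=
    rows.foldl (fun st yi =>
      let inner : List Char × Int :=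
        columns.foldl (fun rp _xi =>
          (rp.1 ++ (if decide (rp.2 ∈ image_data) then on_pixel.toList else off_pixel.toList), rp.2 + 1))
          ([], st.2)
      (st.1 ++ ljustChars (PySem.Int.toChars yi) left_pad ++ '|' :: ' ' :: inner.1 ++ ['|', '\n'], inner.2))
      (frame, 0)
  String.ofList (st.1 ++ rjustChars ['\''] (left_pad + 1) ++ List.replicate (w + 1).toNat '—' ++ ['\''])

-- ===== PORT B =====
def render_output_alt (h_ : Int) (w : Int) (on_pixel : String) (off_pixel : String) (image_data : List Int) : String :=
  let left_pad : Nat := (PySem.Int.toChars h_).length + 1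
  let header0 : List Char :=
    ((PySem.List.pyRange 0 w 1).map (fun c => if c > 9 then (PySem.Int.toChars c).getD 0 ' ' else ' '))
  let header1 : List Char :=
    ((PySem.List.pyRange 0 w 1).map (fun c =>
      if c > 9 then (PySem.Int.toChars c).getD 1 ' ' else (PySem.Int.toChars c).getD 0 ' '))
  let cells0 : List String := PySem.List.pyRepeat [off_pixel] (max h_ 0 * max w 0)
  let cells : List String :=
    image_data.foldl (fun c p =>
      if 0 ≤ p ∧ p < (c.length : Int) then c.set p.toNat on_pixel else c) cells0
  let pad : List Char := List.replicate left_pad ' '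
  let dash : List Char := List.replicate (w + 1).toNat '—'
  let out : List Char :=
    pad ++ ' ' :: header0 ++ '\n' :: pad ++ ' ' :: header1 ++ '\n' :: pad ++ '.' :: dash ++ ['.', '\n']
  let body : List Char :=
    (PySem.List.pyRange 0 h_ 1).foldl (fun acc yi =>
      acc ++ ljustChars (PySem.Int.toChars yi) left_pad ++ '|' :: ' ' ::
        ((PySem.List.slice cells (some (yi * w)) (some ((yi + 1) * w))).map String.toList).flatten
        ++ ['|', '\n'])
      out
  String.ofList (body ++ pad ++ '\'' :: dash ++ ['\''])

-- ===== PRECONDITION & SPEC =====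
def Spec_render_output (h_ : Int) (w : Int) (on_pixel : String) (off_pixel : String) (image_data : List Int) (out : String) : Prop := out = render_output_alt h_ w on_pixel off_pixel image_data
instance (h_ : Int) (w : Int) (on_pixel : String) (off_pixel : String) (image_data : List Int) (out : String) : Decidable (Spec_render_output h_ w on_pixel off_pixel image_data out) := by unfold Spec_render_output; infer_instance

-- ===== CLAIM (what is proved, stated in full; the proofs are below) =====
def Claim_equal_render_output : Prop := ∀ (h_ : Int) (w : Int) (on_pixel : String) (off_pixel : String) (image_data : List Int), Dom_render_output h_ w on_pixel off_pixel image_data → Spec_render_output h_ w on_pixel off_pixel image_data (render_output h_ w on_pixel off_pixel image_data)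

-- ===== LEMMAS AND PROOFS =====


-- loop characterisation helpers (proof-only)

def pvF (on_pixel off_pixel : String) (img : List Int) (p : Int) : List Char :=
  if decide (p ∈ img) then on_pixel.toList else off_pixel.toList

def pvRows (on_pixel off_pixel : String) (img : List Int) (lp W : Nat) : List Int → Int → List Char
  | [], _ => []
  | y :: ys, pos =>
      ljustChars (PySem.Int.toChars y) lp ++ '|' :: ' ' ::
        ((List.range W).map (fun k : Nat => pvF on_pixel off_pixel img (pos + (k : Int)))).flatten ++ ['|', '\n']
      ++ pvRows on_pixel off_pixel img lp W ys (pos + W)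

theorem innerA_eq (on_pixel off_pixel : String) (img : List Int) (cols : List Int) :
    ∀ (row : List Char) (pos : Int),
      cols.foldl (fun rp (_xi : Int) =>
          (rp.1 ++ (if decide (rp.2 ∈ img) then on_pixel.toList else off_pixel.toList), rp.2 + 1))
        (row, pos)
      = (row ++ ((List.range cols.length).map
            (fun k : Nat => pvF on_pixel off_pixel img (pos + (k : Int)))).flatten,
         pos + (cols.length : Int)) := by
  induction cols with
  | nil => intro row pos; simp
  | cons x xs ih =>
      intro row pos
      simp only [List.foldl_cons, ih, List.length_cons, Prod.mk.injEq]
      have hmap : List.map (fun k : Nat => pvF on_pixel off_pixel img (pos + 1 + (k : Int))) (List.range xs.length)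
          = List.map ((fun k : Nat => pvF on_pixel off_pixel img (pos + (k : Int))) ∘ Nat.succ) (List.range xs.length) := by
        apply List.map_congr_left
        intro k _
        have h1 : pos + 1 + (k : Int) = pos + ((k.succ : Nat) : Int) := by push_cast; ring
        simp [Function.comp, h1]
      constructor
      · rw [List.range_succ_eq_map]
        simp only [List.map_cons, List.map_map, List.flatten_cons, List.append_assoc, hmap]
        simp [pvF]
      · push_cast; ring

theorem scatter_len (on_pixel : String) (l : List Int) :
    ∀ (buf : List String),
      (l.foldl (fun buf p => if 0 ≤ p ∧ p < (buf.length : Int) then buf.set p.toNat on_pixel else buf) buf).length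
        = buf.length := by
  induction l with
  | nil => intro buf; rfl
  | cons p l ih =>
      intro buf
      rw [List.foldl_cons, ih]
      split_ifs <;> simp

theorem scatter_get (on_pixel : String) (l : List Int) :
    ∀ (buf : List String) (i : Nat) (hi : i < buf.length),
      (l.foldl (fun buf p => if 0 ≤ p ∧ p < (buf.length : Int) then buf.set p.toNat on_pixel else buf) buf)[i]?
        = some (if (i : Int) ∈ l then on_pixel else buf[i]'hi) := by
  induction l with
  | nil => intro buf i hi; simp [List.getElem?_eq_getElem hi]
  | cons p l ih =>
      intro buf i hi
      have hlen : (if 0 ≤ p ∧ p < (buf.length : Int) then buf.set p.toNat on_pixel else buf).length = buf.length := by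
        split_ifs <;> simp
      rw [List.foldl_cons, ih _ i (by rw [hlen]; exact hi)]
      by_cases hmem : (i : Int) ∈ l
      · simp [hmem]
      · simp only [hmem, if_false, List.mem_cons, or_false]
        by_cases hip : (i : Int) = p
        · have hcond : 0 ≤ p ∧ p < (buf.length : Int) := by constructor <;> omega
          have hpn : p.toNat = i := by omega
          simp [hip, hcond, hpn]
        · simp only [hip, if_false]
          split_ifs with hcond
          · rw [List.getElem_set]
            have hne : ¬ p.toNat = i := by omega
            simp [hne]
          · rfl

theorem slice_nil {α : Type} (a b : Int) : PySem.List.slice ([] : List α) (some a) (some b) = [] := by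
  simp [PySem.List.slice]

theorem slice_scatter (on_pixel off_pixel : String) (img : List Int) (h_ w yi : Int)
    (hy0 : 0 ≤ yi) (hyh : yi < h_) (hw : 0 < w) :
    PySem.List.slice
      (img.foldl (fun buf p => if 0 ≤ p ∧ p < (buf.length : Int) then buf.set p.toNat on_pixel else buf)
        (List.replicate (max h_ 0 * max w 0).toNat off_pixel))
      (some (yi * w)) (some ((yi + 1) * w))
    = (List.range w.toNat).map (fun k : Nat => if (yi * w + (k : Int)) ∈ img then on_pixel else off_pixel) := by
  have hM : max h_ 0 * max w 0 = h_ * w := by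
    rw [max_eq_left (by omega : (0 : Int) ≤ h_), max_eq_left hw.le]
  have e1 : (yi + 1) * w = yi * w + w := by ring
  have e2 : 0 ≤ yi * w := mul_nonneg hy0 hw.le
  have e3 : (yi + 1) * w ≤ h_ * w := by
    apply mul_le_mul_of_nonneg_right _ hw.le
    omega
  set cells := img.foldl (fun buf p => if 0 ≤ p ∧ p < (buf.length : Int) then buf.set p.toNat on_pixel else buf)
        (List.replicate (max h_ 0 * max w 0).toNat off_pixel) with hcells
  have hclen : cells.length = (h_ * w).toNat := by
    rw [hcells, scatter_len]; simp [hM]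
  rw [PySem.List.slice_toNat _ e2 (by omega)]
  apply List.ext_getElem
  · simp only [List.length_take, List.length_drop, List.length_map, List.length_range, hclen]
    omega
  · intro k h1k h2k
    have hk : k < w.toNat := by
      simp only [List.length_map, List.length_range] at h2k; exact h2k
    have hidx : (yi * w).toNat + k < cells.length := by rw [hclen]; omega
    simp only [List.getElem_take, List.getElem_drop, List.getElem_map, List.getElem_range]
    have hrep : ((yi * w).toNat + k) < (List.replicate (max h_ 0 * max w 0).toNat off_pixel).length := by
      simp only [List.length_replicate, hM]
      rw [hclen] at hidx; exact hidx
    have hget := scatter_get on_pixel img (List.replicate (max h_ 0 * max w 0).toNat off_pixel)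
      ((yi * w).toNat + k) hrep
    rw [← hcells] at hget
    have := List.getElem?_eq_getElem hidx
    rw [this] at hget
    have hval := Option.some.inj hget
    rw [hval]
    have hcast : (((yi * w).toNat + k : Nat) : Int) = yi * w + (k : Int) := by omega
    rw [hcast]
    simp

theorem row_eq (on_pixel off_pixel : String) (img : List Int) (h_ w yi : Int)
    (hy0 : 0 ≤ yi) (hyh : yi < h_) :
    ((PySem.List.slice
        (img.foldl (fun buf p => if 0 ≤ p ∧ p < (buf.length : Int) then buf.set p.toNat on_pixel else buf)
          (List.replicate (max h_ 0 * max w 0).toNat off_pixel))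
        (some (yi * w)) (some ((yi + 1) * w))).map String.toList).flatten
    = ((List.range w.toNat).map
        (fun k : Nat => pvF on_pixel off_pixel img (yi * ((w.toNat : Nat) : Int) + (k : Int)))).flatten := by
  by_cases hw : 0 < w
  · rw [slice_scatter on_pixel off_pixel img h_ w yi hy0 hyh hw]
    simp only [List.map_map]
    congr 1
    apply List.map_congr_left
    intro k _
    have hcast : ((w.toNat : Nat) : Int) = w := Int.toNat_of_nonneg hw.le
    simp [Function.comp, pvF, hcast, apply_ite String.toList]
  · have hwn : w.toNat = 0 := by omega
    have hn : (max h_ 0 * max w 0).toNat = 0 := by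
      have hw0 : max w 0 = 0 := by omega
      simp [hw0]
    have hcells : (img.foldl (fun buf p => if 0 ≤ p ∧ p < (buf.length : Int) then buf.set p.toNat on_pixel else buf)
          (List.replicate (max h_ 0 * max w 0).toNat off_pixel)) = [] := by
      apply List.eq_nil_of_length_eq_zero
      rw [scatter_len]; simp [hn]
    rw [hcells, slice_nil, hwn]
    simp

theorem outerA_eq (on_pixel off_pixel : String) (img : List Int) (cols : List Int) (lp : Nat) :
    ∀ (ys : List Int) (st : List Char × Int),
      (ys.foldl (fun st yi =>
          let inner := cols.foldl (fun rp (_xi : Int) =>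
              (rp.1 ++ (if decide (rp.2 ∈ img) then on_pixel.toList else off_pixel.toList), rp.2 + 1))
            ([], st.2)
          (st.1 ++ ljustChars (PySem.Int.toChars yi) lp ++ '|' :: ' ' :: inner.1 ++ ['|', '\n'], inner.2))
        st).1
      = st.1 ++ pvRows on_pixel off_pixel img lp cols.length ys st.2 := by
  intro ys
  induction ys with
  | nil => intro st; simp [pvRows]
  | cons y ys ih =>
      intro st
      rw [List.foldl_cons, ih]
      simp only [innerA_eq on_pixel off_pixel img cols]
      simp [pvRows, List.append_assoc]

theorem rows_eq (on_pixel off_pixel : String) (img : List Int) (h_ w : Int) (lp : Nat) :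
    ∀ (n : Nat) (a : Int), 0 ≤ a → (h_ - a).toNat = n →
      pvRows on_pixel off_pixel img lp w.toNat (PySem.List.pyRange a h_ 1) (a * ((w.toNat : Nat) : Int))
      = (PySem.List.pyRange a h_ 1).flatMap (fun yi =>
          ljustChars (PySem.Int.toChars yi) lp ++ '|' :: ' ' ::
            ((PySem.List.slice
                (img.foldl (fun buf p => if 0 ≤ p ∧ p < (buf.length : Int) then buf.set p.toNat on_pixel else buf)
                  (List.replicate (max h_ 0 * max w 0).toNat off_pixel))
                (some (yi * w)) (some ((yi + 1) * w))).map String.toList).flatten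
            ++ ['|', '\n']) := by
  intro n
  induction n with
  | zero =>
      intro a _ hfuel
      have hle : h_ ≤ a := by omega
      rw [PySem.List.pyRange_one_eq_nil hle]
      simp [pvRows]
  | succ n ih =>
      intro a ha hfuel
      have hlt : a < h_ := by omega
      rw [PySem.List.pyRange_one_cons hlt]
      rw [List.flatMap_cons]
      simp only [pvRows]
      rw [← row_eq on_pixel off_pixel img h_ w a ha hlt]
      have hpos : a * ((w.toNat : Nat) : Int) + (w.toNat : Int) = (a + 1) * ((w.toNat : Nat) : Int) := by ring
      rw [hpos, ih (a + 1) (by omega) (by omega)]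

theorem render_output_same : ∀ (h_ : Int) (w : Int) (on_pixel : String) (off_pixel : String) (image_data : List Int), render_output h_ w on_pixel off_pixel image_data = render_output_alt h_ w on_pixel off_pixel image_data := by
  intro h_ w on_pixel off_pixel img
  simp only [render_output, render_output_alt]
  rw [PySem.List.foldl_prod_mk
        (fun (a : List Char) (hc : Int) => a ++ [if hc > 9 then (PySem.Int.toChars hc).getD 0 ' ' else ' '])
        (fun (a : List Char) (hc : Int) => a ++ [if hc > 9 then (PySem.Int.toChars hc).getD 1 ' ' else (PySem.Int.toChars hc).getD 0 ' '])
        (PySem.List.pyRange 0 w 1) [] []]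
  simp only [PySem.List.foldl_append_singleton_eq_map, List.nil_append]
  simp only [List.foldl_cons, List.foldl_nil]
  rw [outerA_eq on_pixel off_pixel img (PySem.List.pyRange 0 w 1)]
  simp only [PySem.List.length_pyRange_one, Int.sub_zero]
  have hrows := rows_eq on_pixel off_pixel img h_ w ((PySem.Int.toChars h_).length + 1) (h_ - 0).toNat 0 (le_refl 0) rfl
  rw [show ((0 : Int) * ((w.toNat : Nat) : Int)) = 0 from by ring] at hrows
  rw [hrows]
  rw [PySem.List.pyRepeat_singleton]
  simp only [List.append_assoc]
  rw [PySem.List.foldl_append_eq_flatMap]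
  simp [rjustChars, List.replicate_succ', List.append_assoc]

-- ===== VERDICT (by name: the statement is the Claim_ definition above) =====
theorem render_output_spec : Claim_equal_render_output := by
  intro h_ w on off img _
  exact render_output_same h_ w on off img
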